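/- GENERATED by mk_final_copies.py from the proof of the farm's unit `start_decoder.C2c` (farm:start_decoder.C2c.1: Proof.lean) as the
   re-elaboration sweep compiled it — do not edit. -/
import Asan.CheckWalk
import Vorbis.Spec.Units.start_decoder_C2c
import Vorbis.Spec.StartDecoderCarry
import Vorbis.Spec.StartDecoderC7

open X86 X86.User Asan Vorbis Vorbis.Spec Vorbis.Spec.StartDecoder

set_option maxRecDepth 100000
set_option maxHeartbeats 4000000

namespace Vorbis.Spec.start_decoder_C2c

/-- Segment C2c: from the return of `setup_temp_malloc(f, entries)` (0x1143f8, `AtC2c`) to the head of loop 3786 with `j = 0`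
(`AtC4`: no memory change, `Frame.step` / `Cur.step` over the empty footprint), or through the outofmem stub 0x1144d7 (`error(f, 3)`)
to the epilogue (`AtERR`: `C7.fail_exit` over the push and `error`'s footprint). -/
theorem c2c_walk : Vorbis.Spec.start_decoder_C2c.Statement := by
  intro Lay hLay μ hμ u₀ hcode h_error
  intro g i v hat
  obtain ⟨A, A2, A3, Ai, h⟩ := hat
  have hfr := h.frame
  have hhand := h.cur.hand
  have he := hfr.entry
  v_entry he
  simp only [depth] at he_room he_stack
  have w_rip := hfr.rip
  have w_rsp := hfr.rsp
  have c_r14 := h.cur.r14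
  have w_r12 := h.r12
  have c_r12 := h.r12
  have w_eq : Mem.EqOn Vorbis.L.textLo Vorbis.L.textHi u₀.mem v.mem := hfr.code
  have hdf : v.flags .df = false := (show abiInv _ from hfr.inv).1
  have hmx : v.mxcsr &&& 0x1F80 = 0x1F80 := (show abiInv _ from hfr.inv).2
  have hsse := Vorbis.sseOK_of_abiInv hfr.inv
  obtain ⟨hR1, hR2⟩ := hfr.r_eq
  have eR : g.R = (g.e.reg .rsp).toNat - 1480 := rfl
  have eRA : g.RA = (g.e.reg .rsp).toNat := rfl
  have c_rsp : v.reg .rsp = g.e.reg .rsp - 1480 := by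
    rw [w_rsp, eR, ← Vorbis.addr_sub_lit _ 1480 (by show (1480 : Nat) ≤ _; omega), Vorbis.addr_toNat]
  clear w_rsp
  have k_rsp := c_rsp
  have r_f : v.mem.readLE (g.e.reg .rsp - 1456) 8 = g.f := by
    have e : g.e.reg .rsp - 1456 = addr (g.R + 0x18) := by
      have e1 : g.R + 0x18 = (g.e.reg .rsp).toNat - 1456 := by
        show (g.e.reg .rsp).toNat - 1480 + 0x18 = _
        omega
      rw [e1, ← Vorbis.addr_sub_lit _ 1456 (by show (1456 : Nat) ≤ _; omega), Vorbis.addr_toNat]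
    rw [e]
    exact h.cur.slot_f
  have hpos : Pos g A := Pos.of hfr h.cur
  have hfT : (addr g.f).toNat = g.f := Vorbis.toNat_addr _ (by
    have := hpos.f_hi
    omega)
  have hsub : ∀ o, o ∈ stackObjs g.frames ++ A.2 → o ∈ stackObjs g.frames' ++ A.2 := by
    intro o ho
    unfold Ghost.frames'
    rw [stackObjs_cons]
    rcases List.mem_append.mp ho with hs | ho'
    · exact List.mem_append_left _ (List.mem_append_right _ hs)
    · exact List.mem_append_right _ ho'
  have herr := h_error A.2 g.frames'
  have t1 : (g.e.reg .rsp - 1488).toNat = (g.e.reg .rsp).toNat - 1488 := by u_omega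
  have hfn : (UInt64.ofNat g.f).toNat = g.f := hfT
  u_walk hcode [hμ.vendor] until [pc_C4, pc_ERR, pc_C3] span [Vorbis.L.textLo, Vorbis.L.textHi] side (v_side)
  case call_inv => v_inv
  case pre_1144e4 =>
    have hun : ShadowUntouched v.mem s_1144e4.mem := by v_untouched
    have hf' : (s_1144e4.reg .rdi).toNat = g.f := by
      rw [w_rdi]
      exact hfn
    have hrs : (s_1144e4.reg .rsp).toNat + 8 = g.R := by
      rw [w_rsp, t1]
      omega
    refine ⟨⟨?_, hfr.offText⟩, ?_⟩
    · rw [hrs]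
      exact hfr.shadow.untouched hun
    · rw [hf']
      exact hhand.obj.mono hsub
  case cont =>
    -- `error(f, VORBIS_outofmem)` returned: the `jmp` to the epilogue, then `C7.fail_exit`
    v_after_call w_rsp_1144e4 w_mem_1144e4
    have hf : (s_1144e4.reg .rdi).toNat = g.f := by
      rw [w_rdi_1144e4]
      exact hfn
    simp only [hf, t1] at w_same
    have hp : s_1144e4r.reg .rax = 0 ∧ ShadowUntouched s_1144e4.mem s_1144e4r.mem ∧
        s_1144e4r.mem.readLE (s_1144e4.reg .rdi + 140) 4 = (s_1144e4.reg .rsi).toNat % 2 ^ 32 := w_post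
    have w_rax : s_1144e4r.reg .rax = 0 := hp.1
    u_walk hcode [hμ.vendor] until [pc_C4, pc_ERR, pc_C3] span [Vorbis.L.textLo, Vorbis.L.textHi] side (v_side)
    have hpush : Mem.SameExcept [⟨g.R - 408, g.R⟩] v.mem (v.mem.writeLE (g.e.reg .rsp - 1488) 8 1131753) := by
      apply Mem.SameExcept.writeLE
      · rw [t1]
        omega
      · refine ⟨_, List.mem_cons_self, ?_, ?_⟩
        · show g.R - 408 ≤ _
          rw [t1]
          omega
        · show _ ≤ g.R
          rw [t1]
          omega
    have hs : Mem.SameExcept [⟨g.R - 408, g.R⟩, ⟨(g.e.reg .rsp).toNat - 1488 - 48, (g.e.reg .rsp).toNat - 1488⟩,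
        ⟨g.f + 140, g.f + 140 + 4⟩] v.mem s_1144e9.mem := by
      rw [w_mem]
      refine (C7.sameExcept_weaken hpush ?_).trans (C7.sameExcept_weaken w_same ?_)
      · intro w hw
        rw [List.mem_singleton.mp hw]
        exact List.mem_cons_self
      · intro w hw
        exact List.mem_cons_of_mem _ hw
    have hun1 : ShadowUntouched v.mem s_1144e4.mem := by
      rw [w_mem_1144e4]
      apply hpush.eqOn
      intro w hw
      rw [List.mem_singleton.mp hw]
      simp only
      omega
    have hsh : ShadowUntouched v.mem s_1144e9.mem := by
      rw [w_mem]
      exact Mem.EqOn.trans hun1 hp.2.1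
    have hw : ∀ x, x ∈ [(⟨g.R - 408, g.R⟩ : Span), ⟨(g.e.reg .rsp).toNat - 1488 - 48, (g.e.reg .rsp).toNat - 1488⟩,
        ⟨g.f + 140, g.f + 140 + 4⟩] → C7.FailWin g x := by
      intro x hx
      simp only [List.mem_cons, List.mem_nil_iff, or_false] at hx
      unfold C7.FailWin
      rcases hx with rfl | rfl | rfl <;> simp only [] <;> omega
    have hinv' : abiInv s_1144e9 := by
      refine Vorbis.abiInv_of ?_ ?_
      · rw [w_flags]
        exact w_df
      · rw [w_mxcsr]
        exact w_mx
    have hrsp' : s_1144e9.reg .rsp = v.reg .rsp := by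
      rw [w_rsp, c_rsp]
    exact ReachVia.done (Or.inr (C7.fail_exit hfr h.cur hs hsh hw w_rip hrsp' w_eq hinv' w_rax))
  case cont =>
    -- `jne 0x1144ee` is dead: `r12d = ordered = 0`
    exact absurd (by decide) hbr_114407
  case cont =>
    -- the head of loop 3786 with `j = 0`: nothing was written
    have hne : ¬ v.reg .rax = 0 := by
      intro h0
      rw [h0] at hbr_1143fe
      exact hbr_1143fe rfl
    have hT : TempsAre A.1 [((v.reg .rax).toNat, (Codebook.entries v.mem (g.cb v.mem i)).toNat)] := by
      rcases h.res with h0 | hT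
      · exact absurd h0 hne
      · exact hT
    have hs0 : Mem.SameExcept [] v.mem s_114410.mem := by
      rw [w_mem]
      exact Mem.SameExcept.refl _ _
    have hun0 : ShadowUntouched v.mem s_114410.mem := by v_untouched
    have hb : Bits (g.Blk A) g.len s_114410.mem g.f := by
      rw [w_mem]
      exact h.cur.sd.bits
    have hnil : ∀ x, x ∈ ([] : List Span) → OkWin g Ai A (g.cb v.mem i) x := by
      intro x hx
      exact absurd hx List.not_mem_nil
    have hrsp' : s_114410.reg .rsp = v.reg .rsp := w_kept.get .rsp rfl
    have hfr' : Frame u₀ g pc_C4 A s_114410 := Frame.step hfr h.cur hs0 hun0 hnil hb w_rip hrsp' w_eq (by v_inv)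
    obtain ⟨hcur', hcb⟩ := Cur.step hfr h.cur hs0 hun0 hnil hb (w_kept.get .r14 rfl)
    have hsp1 := h.sparse1
    have hno : ¬ Codebook.sparse v.mem (g.cb v.mem i) = 0 := by
      rw [hsp1]
      decide
    apply ReachVia.done
    refine Or.inl ⟨A, (v.reg .rax).toNat, 0, A2, A3, Ai, ?_⟩
    exact
      { frame := hfr'
        cur := hcur'
        k1 := by rw [w_mem]; exact h.k1
        r12 := (w_kept.get .r12 rfl).trans c_r12
        j_le := by rw [w_mem]; exact h.k1.ent_nonneg
        rbp := by rw [w_rbp]; rfl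
        rbx := by rw [w_rbx, Vorbis.addr_toNat]
        lenL := fun j hj => absurd hj (Nat.not_lt_zero j)
        place := by
          rw [w_mem]
          exact
            { sparse_01 := Or.inr hsp1
              sparse_temp := fun _ => hT
              sparse_null := fun _ => h.cl0
              dense_block := fun h0 => absurd h0 hno
              dense_eq := fun h0 => absurd h0 hno
              dense_temps := fun h0 => absurd h0 hno }
        fresh := by rw [w_mem]; exact h.fresh }

end Vorbis.Spec.start_decoder_C2c

theorem Vorbis.Spec.Worked.start_decoder_C2c_ok : Vorbis.Spec.start_decoder_C2c.Statement := Vorbis.Spec.start_decoder_C2c.c2c_walk
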